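-- pv_equiv track=rewrite | github.com/ChapyPengu/Prueba | Algoritmos_ET21/Algoritmos.py | espacio_por_caracter
-- ===== SOURCE A (Python) =====
-- def espacio_por_caracter(cadena, caracter, maxima_cantidad):
--     cadena_final = ""
--     cantidad = 0
--     for x in cadena:
--         cadena_final = cadena_final + x
--         if x == " ":
--             cantidad += 1
--             cadena_final = cadena_final[0: -1]
--             cadena_final = cadena_final + caracter
--             if cantidad == maxima_cantidad:
--                 break
--     return cadena_final
-- ===== SOURCE B (Python) =====
-- def espacio_por_caracter(cadena, caracter, maxima_cantidad):
--     cantidad = 0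
--     for i, c in enumerate(cadena):
--         if c == " ":
--             cantidad += 1
--             if cantidad == maxima_cantidad:
--                 return cadena[:i + 1].replace(" ", caracter)
--     return cadena.replace(" ", caracter)
-- ===== Notes on version B (the rewrite author's own statement) =====
-- stated objective: simpler
-- what changed: B first scans once to locate the index of the maxima_cantidad-th space, then returns the slice through it with a single bulk str.replace, instead of A's char-by-char copy that slices off and re-appends at every space.
import Mathlib
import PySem

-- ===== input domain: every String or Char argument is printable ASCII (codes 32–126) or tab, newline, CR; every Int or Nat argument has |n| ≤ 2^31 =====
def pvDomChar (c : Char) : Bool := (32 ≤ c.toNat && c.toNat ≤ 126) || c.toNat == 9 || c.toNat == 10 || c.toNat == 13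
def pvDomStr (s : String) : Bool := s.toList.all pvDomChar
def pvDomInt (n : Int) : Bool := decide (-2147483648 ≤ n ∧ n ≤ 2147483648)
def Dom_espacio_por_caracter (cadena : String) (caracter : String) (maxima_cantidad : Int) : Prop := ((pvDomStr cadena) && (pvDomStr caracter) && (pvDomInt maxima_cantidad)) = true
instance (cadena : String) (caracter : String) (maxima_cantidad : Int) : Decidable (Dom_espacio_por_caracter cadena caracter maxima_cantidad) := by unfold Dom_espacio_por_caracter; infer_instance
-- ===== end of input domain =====

-- B locates the Nth space first, then returns the slice through it with one bulk replace(" ", caracter),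
-- instead of A's char-by-char copy with per-space slicing; objective: simpler decomposition.
-- ===== PORT A =====
-- the for-loop of A: state = (cadena_final, cantidad), early exit on break
def pvA_loop (caracter : List Char) (maxima : Int) : List Char → List Char → Int → List Char
  | [], acc, _ => acc
  | x :: rest, acc, cantidad =>
    let acc1 := acc ++ [x]                                   -- cadena_final = cadena_final + x
    if x = ' ' then
      let cantidad' := cantidad + 1
      let acc2 := PySem.List.slice acc1 (some 0) (some (-1)) -- cadena_final = cadena_final[0: -1]
      let acc3 := acc2 ++ caracter                           -- cadena_final = cadena_final + caracter
      if cantidad' = maxima then acc3                        -- break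
      else pvA_loop caracter maxima rest acc3 cantidad'
    else pvA_loop caracter maxima rest acc1 cantidad

def espacio_por_caracter (cadena : String) (caracter : String) (maxima_cantidad : Int) : String :=
  String.ofList (pvA_loop caracter.toList maxima_cantidad cadena.toList [] 0)

-- ===== PORT B =====
-- the for-loop of B over enumerate(cadena): returns the index of the maxima-th space, if reached
def pvB_find (maxima : Int) : List (Int × Char) → Int → Option Int
  | [], _ => none
  | (i, c) :: rest, cantidad =>
    if c = ' ' then
      if cantidad + 1 = maxima then some i
      else pvB_find maxima rest (cantidad + 1)
    else pvB_find maxima rest cantidad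

def espacio_por_caracter_alt (cadena : String) (caracter : String) (maxima_cantidad : Int) : String :=
  match pvB_find maxima_cantidad (PySem.List.enumerate cadena.toList 0) 0 with
  | some i => String.ofList (PySem.Chars.replace
      (PySem.List.slice cadena.toList none (some (i + 1))) [' '] caracter.toList)  -- cadena[:i+1].replace(" ", caracter)
  | none => PySem.Str.replace cadena " " caracter

-- ===== PRECONDITION & SPEC =====
def Spec_espacio_por_caracter (cadena : String) (caracter : String) (maxima_cantidad : Int) (out : String) : Prop := out = espacio_por_caracter_alt cadena caracter maxima_cantidad
instance (cadena : String) (caracter : String) (maxima_cantidad : Int) (out : String) : Decidable (Spec_espacio_por_caracter cadena caracter maxima_cantidad out) := by unfold Spec_espacio_por_caracter; infer_instance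

-- ===== CLAIM (what is proved, stated in full; the proofs are below) =====
def Claim_equal_espacio_por_caracter : Prop := ∀ (cadena : String) (caracter : String) (maxima_cantidad : Int), Dom_espacio_por_caracter cadena caracter maxima_cantidad → Spec_espacio_por_caracter cadena caracter maxima_cantidad (espacio_por_caracter cadena caracter maxima_cantidad)

-- ===== LEMMAS AND PROOFS =====
def pvRepl (car : List Char) (l : List Char) : List Char :=
  l.flatMap (fun c => if c = ' ' then car else [c])

theorem pvReplace_go_space (car : List Char) :
    ∀ (l : List Char) (fuel : Nat) (acc : List Char), l.length ≤ fuel →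
      PySem.Chars.replace.go [' '] car fuel l acc = acc.reverse ++ pvRepl car l := by
  intro l
  induction l with
  | nil => intro fuel acc h; cases fuel <;> simp [PySem.Chars.replace.go, pvRepl]
  | cons c t ih =>
    intro fuel acc h
    cases fuel with
    | zero => simp at h
    | succ n =>
      simp only [PySem.Chars.replace.go]
      by_cases hc : c = ' '
      · subst hc
        rw [if_pos (by simp [List.isPrefixOf])]
        simp only [List.length_cons] at h
        rw [show List.drop [' '].length (' ' :: t) = t from rfl]
        rw [ih n (car.reverse ++ acc) (by omega)]
        simp [pvRepl]
      · rw [if_neg (by simp [List.isPrefixOf]; intro h'; exact hc h'.symm)]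
        simp only [List.length_cons] at h
        rw [ih n (c :: acc) (by omega)]
        simp [pvRepl, hc]

theorem pvReplace_space (car l : List Char) :
    PySem.Chars.replace l [' '] car = pvRepl car l := by
  rw [show PySem.Chars.replace l [' '] car = PySem.Chars.replace.go [' '] car l.length l [] from rfl]
  rw [pvReplace_go_space car l l.length [] le_rfl]; rfl


def pvCut (car : List Char) (maxima : Int) : List Char → Int → List Char
  | [], _ => []
  | c :: rest, cnt =>
    if c = ' ' then
      (if cnt + 1 = maxima then car else car ++ pvCut car maxima rest (cnt + 1))
    else c :: pvCut car maxima rest cnt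

theorem pvA_loop_eq (car : List Char) (M : Int) :
    ∀ (l acc : List Char) (cnt : Int),
      pvA_loop car M l acc cnt = acc ++ pvCut car M l cnt := by
  intro l
  induction l with
  | nil => intro acc cnt; simp [pvA_loop, pvCut]
  | cons c t ih =>
    intro acc cnt
    simp only [pvA_loop, pvCut]
    by_cases hc : c = ' '
    · simp only [hc]
      rw [PySem.List.slice_zero_start, PySem.List.slice_to_neg_one]
      simp only [List.dropLast_concat]
      by_cases hm : cnt + 1 = M
      · simp [hm]
      · simp only [hm, ite_false, ih]
        simp
    · simp [hc, ih]

theorem pvB_find_ge (M : Int) :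
    ∀ (l : List Char) (s cnt i : Int),
      pvB_find M (PySem.List.enumerate l s) cnt = some i → s ≤ i := by
  intro l
  induction l with
  | nil => intro s cnt i h; simp [PySem.List.enumerate_nil, pvB_find] at h
  | cons c t ih =>
    intro s cnt i h
    rw [PySem.List.enumerate_cons] at h
    simp only [pvB_find] at h
    by_cases hc : c = ' '
    · simp only [hc] at h
      by_cases hm : cnt + 1 = M
      · simp [hm] at h; omega
      · simp only [hm, ite_false] at h
        have := ih (s+1) (cnt+1) i h; omega
    · rw [if_neg hc] at h
      have := ih (s+1) cnt i h; omega

theorem pvB_eq (car : List Char) (M : Int) :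
    ∀ (l : List Char) (s cnt : Int),
      (match pvB_find M (PySem.List.enumerate l s) cnt with
        | some i => pvRepl car (l.take (i - s + 1).toNat)
        | none => pvRepl car l) = pvCut car M l cnt := by
  intro l
  induction l with
  | nil => intro s cnt; simp [PySem.List.enumerate_nil, pvB_find, pvCut, pvRepl]
  | cons c t ih =>
    intro s cnt
    rw [PySem.List.enumerate_cons]
    by_cases hc : c = ' '
    · subst hc
      by_cases hm : cnt + 1 = M
      · have hs : pvB_find M ((s, ' ') :: PySem.List.enumerate t (s+1)) cnt = some s := by
          simp [pvB_find, hm]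
        rw [hs]
        simp [pvCut, hm, pvRepl]
      · have hs : pvB_find M ((s, ' ') :: PySem.List.enumerate t (s+1)) cnt
            = pvB_find M (PySem.List.enumerate t (s+1)) (cnt+1) := by
          simp [pvB_find, hm]
        have hrhs : pvCut car M (' ' :: t) cnt = car ++ pvCut car M t (cnt+1) := by
          simp [pvCut, hm]
        rw [hs, hrhs, ← ih (s+1) (cnt+1)]
        cases hfind : pvB_find M (PySem.List.enumerate t (s+1)) (cnt+1) with
        | none => simp [pvRepl]
        | some i =>
          have hge := pvB_find_ge M t (s+1) (cnt+1) i hfind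
          simp only
          have h1 : (i - s + 1).toNat = (i - (s+1) + 1).toNat + 1 := by omega
          rw [h1, List.take_succ_cons]
          simp [pvRepl]
    · have hs : pvB_find M ((s, c) :: PySem.List.enumerate t (s+1)) cnt
          = pvB_find M (PySem.List.enumerate t (s+1)) cnt := by
        simp [pvB_find, hc]
      have hrhs : pvCut car M (c :: t) cnt = c :: pvCut car M t cnt := by
        simp [pvCut, hc]
      rw [hs, hrhs, ← ih (s+1) cnt]
      cases hfind : pvB_find M (PySem.List.enumerate t (s+1)) cnt with
      | none => simp [pvRepl, hc]
      | some i =>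
        have hge := pvB_find_ge M t (s+1) cnt i hfind
        simp only
        have h1 : (i - s + 1).toNat = (i - (s+1) + 1).toNat + 1 := by omega
        rw [h1, List.take_succ_cons]
        simp [pvRepl, hc]

-- ===== VERDICT (by name: the statement is the Claim_ definition above) =====
theorem espacio_por_caracter_spec : Claim_equal_espacio_por_caracter := by
  intro cadena caracter M _
  unfold Spec_espacio_por_caracter
  unfold espacio_por_caracter espacio_por_caracter_alt
  rw [pvA_loop_eq, List.nil_append, ← pvB_eq caracter.toList M cadena.toList 0 0]
  cases hfind : pvB_find M (PySem.List.enumerate cadena.toList 0) 0 with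
  | none =>
    simp only
    rw [show PySem.Str.replace cadena " " caracter
        = String.ofList (PySem.Chars.replace cadena.toList [' '] caracter.toList) from rfl,
      pvReplace_space]
  | some i =>
    have hge := pvB_find_ge M cadena.toList 0 0 i hfind
    simp only
    rw [PySem.List.slice_to _ (by omega : (0:Int) ≤ i + 1), pvReplace_space]
    have h1 : i - 0 + 1 = i + 1 := by ring
    rw [h1]
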